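-- pv_equiv track=rewrite | github.com/nasir97177/ava_enhancements | ava_enhancements/ava_enhancements/report/channel_wise_monthly_selling_rate/channel_wise_monthly_selling_rate.py | get_channel
-- ===== SOURCE A (Python) =====
-- CHANNEL_MAPPING = {
--     "DIRECT DISTRIBUTION DD": [
--         "EATRIES", "LARGE GROCERY", "MINIMARKET", "SMALL GROCERY",
--         "SUPERMARKET B", "WATER SHOP", "DIRECT DISTRIBUTION DD"
--     ],
--     "DISTRIBUTOR": [
--         "DISTRIBUTOR A", "DISTRIBUTOR B", "DISTRIBUTOR C", "DISTRIBUTOR"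
--     ],
--     "HOME DELIVERY HD": [
--         "HOUSE", "MOSQUE", "OFFICE", "SCHOOL", "HOME DELIVERY HD"
--     ],
--     "HORECA HO": [
--         "CAFÉ", "CARE", "CATERING", "COMMERCIAL", "GOVERNMENTAL",
--         "HOTEL", "INSTITUTIONAL", "RESTAURANT", "HORECA HO", "CAFE"
--     ],
--     "KEY ACCOUNT KA": [
--         "E-COMMERCE", "HYPERMARKET", "SUPERMARKET-A", "SUPERMARKET-B", "KEY ACCOUNT  KA"
--     ],
--     "MARKETING": [
--         "MARKETING", "DONATION", "EVENT", "SPONSORSHIP"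
--     ],
--     "OTHER MISCELLANEOUS": [
--         "OTHER MISCELLANEOUS", "OTHER  MISCELLANEOUS"
--     ],
--     "WHOLESALE": [
--         "WHOLESALE WS", "WAREHOUSE", "WHOLESALE A", "WHOLESALE-B", "WHOLESALE-C"
--     ]
-- }
--
-- def get_channel(customer_group):
--     if not customer_group:
--         return ""
--     customer_group_upper = customer_group.strip().upper()
--     for channel, groups in CHANNEL_MAPPING.items():
--         if customer_group_upper in (g.upper() for g in groups):
--             return channel
--     return ""
-- ===== SOURCE B (Python) =====
-- # Hand-written reverse lookup table: uppercased customer group -> channel name.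
-- # B replaces A's per-call nested scan over CHANNEL_MAPPING with one dict lookup.
-- REVERSE = {
--     'EATRIES': 'DIRECT DISTRIBUTION DD',
--     'LARGE GROCERY': 'DIRECT DISTRIBUTION DD',
--     'MINIMARKET': 'DIRECT DISTRIBUTION DD',
--     'SMALL GROCERY': 'DIRECT DISTRIBUTION DD',
--     'SUPERMARKET B': 'DIRECT DISTRIBUTION DD',
--     'WATER SHOP': 'DIRECT DISTRIBUTION DD',
--     'DIRECT DISTRIBUTION DD': 'DIRECT DISTRIBUTION DD',
--     'DISTRIBUTOR A': 'DISTRIBUTOR',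
--     'DISTRIBUTOR B': 'DISTRIBUTOR',
--     'DISTRIBUTOR C': 'DISTRIBUTOR',
--     'DISTRIBUTOR': 'DISTRIBUTOR',
--     'HOUSE': 'HOME DELIVERY HD',
--     'MOSQUE': 'HOME DELIVERY HD',
--     'OFFICE': 'HOME DELIVERY HD',
--     'SCHOOL': 'HOME DELIVERY HD',
--     'HOME DELIVERY HD': 'HOME DELIVERY HD',
--     'CAFÉ': 'HORECA HO',
--     'CARE': 'HORECA HO',
--     'CATERING': 'HORECA HO',
--     'COMMERCIAL': 'HORECA HO',
--     'GOVERNMENTAL': 'HORECA HO',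
--     'HOTEL': 'HORECA HO',
--     'INSTITUTIONAL': 'HORECA HO',
--     'RESTAURANT': 'HORECA HO',
--     'HORECA HO': 'HORECA HO',
--     'CAFE': 'HORECA HO',
--     'E-COMMERCE': 'KEY ACCOUNT KA',
--     'HYPERMARKET': 'KEY ACCOUNT KA',
--     'SUPERMARKET-A': 'KEY ACCOUNT KA',
--     'SUPERMARKET-B': 'KEY ACCOUNT KA',
--     'KEY ACCOUNT  KA': 'KEY ACCOUNT KA',
--     'MARKETING': 'MARKETING',
--     'DONATION': 'MARKETING',
--     'EVENT': 'MARKETING',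
--     'SPONSORSHIP': 'MARKETING',
--     'OTHER MISCELLANEOUS': 'OTHER MISCELLANEOUS',
--     'OTHER  MISCELLANEOUS': 'OTHER MISCELLANEOUS',
--     'WHOLESALE WS': 'WHOLESALE',
--     'WAREHOUSE': 'WHOLESALE',
--     'WHOLESALE A': 'WHOLESALE',
--     'WHOLESALE-B': 'WHOLESALE',
--     'WHOLESALE-C': 'WHOLESALE',
-- }
--
--
-- def get_channel(customer_group):
--     if not customer_group:
--         return ""
--     return REVERSE.get(customer_group.strip().upper(), "")
-- ===== Notes on version B (the rewrite author's own statement) =====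
-- stated objective: idiomatic
-- what changed: B drops the per-call scan over CHANNEL_MAPPING (outer loop over channels with an inner uppercased-membership generator) and instead carries a hand-written module-level reverse dict REVERSE (uppercased group -> channel), so get_channel is a single dict lookup with a default.
import Mathlib
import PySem

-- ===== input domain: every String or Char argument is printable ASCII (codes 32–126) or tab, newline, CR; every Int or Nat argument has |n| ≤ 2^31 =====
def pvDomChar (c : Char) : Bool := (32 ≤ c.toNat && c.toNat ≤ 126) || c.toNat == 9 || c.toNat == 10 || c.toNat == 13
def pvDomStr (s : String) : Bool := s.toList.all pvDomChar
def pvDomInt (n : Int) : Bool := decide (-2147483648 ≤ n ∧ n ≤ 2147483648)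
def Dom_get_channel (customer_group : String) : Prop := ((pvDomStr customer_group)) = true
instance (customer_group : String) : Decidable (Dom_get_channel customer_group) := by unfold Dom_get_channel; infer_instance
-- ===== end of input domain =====

-- B replaces A's per-call nested scan over CHANNEL_MAPPING with a hand-written reverse
-- lookup table (uppercased group -> channel) consulted by a single dict lookup (idiomatic).

-- ===== PORT A =====
def CHANNEL_MAPPING : List (String × List String) :=
  [("DIRECT DISTRIBUTION DD",
     ["EATRIES", "LARGE GROCERY", "MINIMARKET", "SMALL GROCERY",
      "SUPERMARKET B", "WATER SHOP", "DIRECT DISTRIBUTION DD"]),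
   ("DISTRIBUTOR",
     ["DISTRIBUTOR A", "DISTRIBUTOR B", "DISTRIBUTOR C", "DISTRIBUTOR"]),
   ("HOME DELIVERY HD",
     ["HOUSE", "MOSQUE", "OFFICE", "SCHOOL", "HOME DELIVERY HD"]),
   ("HORECA HO",
     ["CAFÉ", "CARE", "CATERING", "COMMERCIAL", "GOVERNMENTAL",
      "HOTEL", "INSTITUTIONAL", "RESTAURANT", "HORECA HO", "CAFE"]),
   ("KEY ACCOUNT KA",
     ["E-COMMERCE", "HYPERMARKET", "SUPERMARKET-A", "SUPERMARKET-B", "KEY ACCOUNT  KA"]),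
   ("MARKETING",
     ["MARKETING", "DONATION", "EVENT", "SPONSORSHIP"]),
   ("OTHER MISCELLANEOUS",
     ["OTHER MISCELLANEOUS", "OTHER  MISCELLANEOUS"]),
   ("WHOLESALE",
     ["WHOLESALE WS", "WAREHOUSE", "WHOLESALE A", "WHOLESALE-B", "WHOLESALE-C"])]

-- the 'for channel, groups in CHANNEL_MAPPING.items()' loop with its early return
def aScan (u : String) : List (String × List String) → String
  | [] => ""
  | (channel, groups) :: rest =>
      if u ∈ groups.map PySem.Str.upper then channel else aScan u rest

def get_channel (customer_group : String) : String :=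
  if customer_group == "" then ""
  else aScan (PySem.Str.upper (PySem.Str.strip customer_group)) CHANNEL_MAPPING

-- ===== PORT B =====
-- Source B's hand-written dict literal (distinct keys, insertion order) ported as a Dict
def REVERSE : PySem.Dict String String := PySem.Dict.mk
  [("EATRIES", "DIRECT DISTRIBUTION DD"),
   ("LARGE GROCERY", "DIRECT DISTRIBUTION DD"),
   ("MINIMARKET", "DIRECT DISTRIBUTION DD"),
   ("SMALL GROCERY", "DIRECT DISTRIBUTION DD"),
   ("SUPERMARKET B", "DIRECT DISTRIBUTION DD"),
   ("WATER SHOP", "DIRECT DISTRIBUTION DD"),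
   ("DIRECT DISTRIBUTION DD", "DIRECT DISTRIBUTION DD"),
   ("DISTRIBUTOR A", "DISTRIBUTOR"),
   ("DISTRIBUTOR B", "DISTRIBUTOR"),
   ("DISTRIBUTOR C", "DISTRIBUTOR"),
   ("DISTRIBUTOR", "DISTRIBUTOR"),
   ("HOUSE", "HOME DELIVERY HD"),
   ("MOSQUE", "HOME DELIVERY HD"),
   ("OFFICE", "HOME DELIVERY HD"),
   ("SCHOOL", "HOME DELIVERY HD"),
   ("HOME DELIVERY HD", "HOME DELIVERY HD"),
   ("CAFÉ", "HORECA HO"),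
   ("CARE", "HORECA HO"),
   ("CATERING", "HORECA HO"),
   ("COMMERCIAL", "HORECA HO"),
   ("GOVERNMENTAL", "HORECA HO"),
   ("HOTEL", "HORECA HO"),
   ("INSTITUTIONAL", "HORECA HO"),
   ("RESTAURANT", "HORECA HO"),
   ("HORECA HO", "HORECA HO"),
   ("CAFE", "HORECA HO"),
   ("E-COMMERCE", "KEY ACCOUNT KA"),
   ("HYPERMARKET", "KEY ACCOUNT KA"),
   ("SUPERMARKET-A", "KEY ACCOUNT KA"),
   ("SUPERMARKET-B", "KEY ACCOUNT KA"),
   ("KEY ACCOUNT  KA", "KEY ACCOUNT KA"),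
   ("MARKETING", "MARKETING"),
   ("DONATION", "MARKETING"),
   ("EVENT", "MARKETING"),
   ("SPONSORSHIP", "MARKETING"),
   ("OTHER MISCELLANEOUS", "OTHER MISCELLANEOUS"),
   ("OTHER  MISCELLANEOUS", "OTHER MISCELLANEOUS"),
   ("WHOLESALE WS", "WHOLESALE"),
   ("WAREHOUSE", "WHOLESALE"),
   ("WHOLESALE A", "WHOLESALE"),
   ("WHOLESALE-B", "WHOLESALE"),
   ("WHOLESALE-C", "WHOLESALE")]

def get_channel_alt (customer_group : String) : String :=
  if customer_group == "" then ""
  else REVERSE.getD (PySem.Str.upper (PySem.Str.strip customer_group)) ""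

-- ===== PRECONDITION & SPEC =====
def Spec_get_channel (customer_group : String) (out : String) : Prop := out = get_channel_alt customer_group
instance (customer_group : String) (out : String) : Decidable (Spec_get_channel customer_group out) := by unfold Spec_get_channel; infer_instance

-- ===== CLAIM (what is proved, stated in full; the proofs are below) =====
def Claim_equal_get_channel : Prop := ∀ (customer_group : String), Dom_get_channel customer_group → Spec_get_channel customer_group (get_channel customer_group)

-- ===== LEMMAS AND PROOFS =====

-- the flat reverse association list A's nested data amounts to
def flatPairs (m : List (String × List String)) : List (String × String) :=
  m.flatMap (fun p => p.2.map (fun g => (PySem.Str.upper g, p.1)))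

-- first-match lookup over one group's block of the flat list
lemma get?_block (gs : List String) (ch u : String) (rest : List (String × String)) :
    (PySem.Dict.mk (gs.map (fun g => (PySem.Str.upper g, ch)) ++ rest)).get? u =
      if u ∈ gs.map PySem.Str.upper then some ch else (PySem.Dict.mk rest).get? u := by
  induction gs with
  | nil => simp
  | cons g gs ih =>
    simp only [List.map_cons, List.cons_append, PySem.Dict.get?_mk_cons, ih, List.mem_cons]
    by_cases he : PySem.Str.upper g = u
    · simp [he]
    · simp [he, Ne.symm he]

-- first-match lookup in the flat list = A's channel scan
lemma get?_flatPairs (m : List (String × List String)) (u : String) :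
    ((PySem.Dict.mk (flatPairs m)).get? u).getD "" = aScan u m := by
  induction m with
  | nil => simp [flatPairs, aScan, PySem.Dict.get?]
  | cons p rest ih =>
    obtain ⟨ch, gs⟩ := p
    simp only [flatPairs, List.flatMap_cons] at *
    rw [get?_block]
    simp only [aScan]
    by_cases hm : u ∈ gs.map PySem.Str.upper
    · simp [hm]
    · simp [hm, ih]

lemma reverse_getD_eq_aScan (u : String) :
    REVERSE.getD u "" = aScan u CHANNEL_MAPPING := by
  have hR : REVERSE = PySem.Dict.mk (flatPairs CHANNEL_MAPPING) := by rfl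
  rw [hR, PySem.Dict.getD_eq_get?_getD, get?_flatPairs]

-- ===== VERDICT (by name: the statement is the Claim_ definition above) =====
theorem get_channel_spec : Claim_equal_get_channel := by
  intro customer_group _
  unfold Spec_get_channel get_channel get_channel_alt
  by_cases h : customer_group == ""
  · rw [if_pos h, if_pos h]
  · rw [if_neg h, if_neg h]
    exact (reverse_getD_eq_aScan _).symm
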